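-- pv_equiv track=rewrite | github.com/Lounes78/sesame_distillation__moshi | AI_to_AI/utils/check_prompt_uniqueness.py | create_prompt_pairs_chunks
-- ===== SOURCE A (Python) =====
-- def create_prompt_pairs_chunks(all_prompts, num_workers):
--     """
--     Create chunks of prompt pairs for parallel processing.
--
--     Args:
--         all_prompts: List of all prompt objects
--         num_workers: Number of worker processes
--
--     Returns:
--         List of chunks, where each chunk contains prompt pairs to compare
--     """
--     total_pairs = len(all_prompts) * (len(all_prompts) - 1) // 2
--     pairs_per_chunk = max(1, total_pairs // num_workers)
--
--     chunks = []
--     current_chunk = []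
--
--     for i in range(len(all_prompts)):
--         for j in range(i + 1, len(all_prompts)):
--             current_chunk.append((all_prompts[i], all_prompts[j]))
--
--             if len(current_chunk) >= pairs_per_chunk:
--                 chunks.append(current_chunk)
--                 current_chunk = []
--
--     # Add remaining pairs to the last chunk
--     if current_chunk:
--         if chunks:
--             chunks[-1].extend(current_chunk)
--         else:
--             chunks.append(current_chunk)
--
--     return chunks
-- ===== SOURCE B (Python) =====
-- def create_prompt_pairs_chunks(all_prompts, num_workers):
--     """Two-pass: build the full ordered pair list, then partition it by slicing."""
--     n = len(all_prompts)
--     pairs = [(all_prompts[i], all_prompts[j]) for i in range(n) for j in range(i + 1, n)]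
--     if not pairs:
--         return []
--     p = max(1, len(pairs) // num_workers)
--     f = len(pairs) // p
--     return [pairs[k * p:(k + 1) * p] for k in range(f - 1)] + [pairs[(f - 1) * p:]]
-- ===== Notes on version B (the rewrite author's own statement) =====
-- stated objective: simpler
-- what changed: Replaces A's interleaved generate-and-flush accumulator (nested loops with a running chunk, flush-at-threshold, and a final remainder-merge patch) by a two-pass decomposition: build the full ordered pair list with one comprehension, then partition it arithmetically by slicing, the last slice absorbing the remainder.
import Mathlib
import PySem

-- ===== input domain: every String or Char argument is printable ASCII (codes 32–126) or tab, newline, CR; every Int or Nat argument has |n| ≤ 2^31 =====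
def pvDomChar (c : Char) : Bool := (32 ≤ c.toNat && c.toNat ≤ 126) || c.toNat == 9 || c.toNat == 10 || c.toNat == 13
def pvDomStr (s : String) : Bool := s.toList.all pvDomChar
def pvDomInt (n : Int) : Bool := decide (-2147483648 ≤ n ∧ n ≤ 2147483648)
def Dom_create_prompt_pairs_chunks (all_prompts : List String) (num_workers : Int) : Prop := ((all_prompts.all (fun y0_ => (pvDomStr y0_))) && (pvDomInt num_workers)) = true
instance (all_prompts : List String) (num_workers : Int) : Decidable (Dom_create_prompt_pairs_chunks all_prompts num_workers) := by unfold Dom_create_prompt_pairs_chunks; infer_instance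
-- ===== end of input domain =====

-- B replaces A's interleaved generate-and-flush accumulator by a two-pass decomposition
-- (build the full pair list, then partition it by slicing); objective: simpler.

-- ===== PORT A =====
def create_prompt_pairs_chunks (all_prompts : List String) (num_workers : Int) : List (List (String × String)) :=
  let n : Int := all_prompts.length
  let total_pairs : Int := PySem.Int.floordiv (n * (n - 1)) 2
  let pairs_per_chunk : Int := max 1 (PySem.Int.floordiv total_pairs num_workers)
  let st :=
    (PySem.List.pyRange 0 n 1).foldl (fun st i =>
      (PySem.List.pyRange (i + 1) n 1).foldl (fun st j =>
        let cur := st.2 ++ [(PySem.List.pyGetD all_prompts i "", PySem.List.pyGetD all_prompts j "")]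
        if pairs_per_chunk ≤ (cur.length : Int) then (st.1 ++ [cur], ([] : List (String × String)))
        else (st.1, cur)) st)
      (([] : List (List (String × String))), ([] : List (String × String)))
  if st.2 ≠ [] then
    if st.1 ≠ [] then st.1.dropLast ++ [PySem.List.pyGetD st.1 (-1) [] ++ st.2]
    else st.1 ++ [st.2]
  else st.1

-- ===== PORT B =====
def create_prompt_pairs_chunks_alt (all_prompts : List String) (num_workers : Int) : List (List (String × String)) :=
  let n : Int := all_prompts.length
  let pairs := (PySem.List.pyRange 0 n 1).flatMap (fun i =>
    (PySem.List.pyRange (i + 1) n 1).map (fun j =>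
      (PySem.List.pyGetD all_prompts i "", PySem.List.pyGetD all_prompts j "")))
  if pairs = [] then []
  else
    let p : Int := max 1 (PySem.Int.floordiv (pairs.length : Int) num_workers)
    let f : Int := PySem.Int.floordiv (pairs.length : Int) p
    (PySem.List.pyRange 0 (f - 1) 1).map (fun k =>
      PySem.List.slice pairs (some (k * p)) (some ((k + 1) * p)))
    ++ [PySem.List.slice pairs (some ((f - 1) * p)) none]

-- ===== PRECONDITION & SPEC =====
-- Pre_ excludes exactly num_workers = 0, on which Python A raises ZeroDivisionError.
def Pre_create_prompt_pairs_chunks (all_prompts : List String) (num_workers : Int) : Prop :=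
  num_workers ≠ 0
instance (all_prompts : List String) (num_workers : Int) : Decidable (Pre_create_prompt_pairs_chunks all_prompts num_workers) := by unfold Pre_create_prompt_pairs_chunks; infer_instance
def pvWitness_create_prompt_pairs_chunks : List String × Int := (["a", "b", "c", "d"], 2)

def Spec_create_prompt_pairs_chunks (all_prompts : List String) (num_workers : Int) (out : List (List (String × String))) : Prop := out = create_prompt_pairs_chunks_alt all_prompts num_workers
instance (all_prompts : List String) (num_workers : Int) (out : List (List (String × String))) : Decidable (Spec_create_prompt_pairs_chunks all_prompts num_workers out) := by unfold Spec_create_prompt_pairs_chunks; infer_instance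

-- ===== CLAIM (what is proved, stated in full; the proofs are below) =====
def Claim_equal_create_prompt_pairs_chunks : Prop := ∀ (all_prompts : List String) (num_workers : Int), Dom_create_prompt_pairs_chunks all_prompts num_workers → Pre_create_prompt_pairs_chunks all_prompts num_workers → Spec_create_prompt_pairs_chunks all_prompts num_workers (create_prompt_pairs_chunks all_prompts num_workers)
-- ===== LEMMAS AND PROOFS =====

-- A's flush step, the folded body of A's nested loops once the pair being appended is abstracted.
def pvStep (p : Int) (st : List (List (String × String)) × List (String × String))
    (x : String × String) : List (List (String × String)) × List (String × String) :=
  let cur := st.2 ++ [x]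
  if p ≤ (cur.length : Int) then (st.1 ++ [cur], []) else (st.1, cur)

-- Proof-side: split a list into maximal full chunks of size p plus the remainder.
def pvSplitFull (p : Nat) (L : List (String × String)) :
    List (List (String × String)) × List (String × String) :=
  if h : 1 ≤ p ∧ p ≤ L.length then
    let s := pvSplitFull p (L.drop p)
    (L.take p :: s.1, s.2)
  else ([], L)
termination_by L.length
decreasing_by simp; omega

-- fusing A's nested loops into one fold of pvStep over B's pair list
theorem pv_fuse (as : List String) (p : Int) (init : List (List (String × String)) × List (String × String)) :
    (PySem.List.pyRange 0 (as.length : Int) 1).foldl (fun st i =>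
      (PySem.List.pyRange (i + 1) (as.length : Int) 1).foldl (fun st j =>
        let cur := st.2 ++ [(PySem.List.pyGetD as i "", PySem.List.pyGetD as j "")]
        if p ≤ (cur.length : Int) then (st.1 ++ [cur], ([] : List (String × String)))
        else (st.1, cur)) st) init
    = ((PySem.List.pyRange 0 (as.length : Int) 1).flatMap (fun i =>
        (PySem.List.pyRange (i + 1) (as.length : Int) 1).map (fun j =>
          (PySem.List.pyGetD as i "", PySem.List.pyGetD as j "")))).foldl (pvStep p) init := by
  rw [List.foldl_flatMap]
  simp only [List.foldl_map, pvStep]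

-- the loop invariant: folding pvStep from (cs, cur), |cur| < p, produces the full chunks of cur ++ L
theorem pv_loop (p : Int) (hp : 1 ≤ p) :
    ∀ (L : List (String × String)) (cs : List (List (String × String))) (cur : List (String × String)),
      (cur.length : Int) < p →
      L.foldl (pvStep p) (cs, cur)
        = (cs ++ (pvSplitFull p.toNat (cur ++ L)).1, (pvSplitFull p.toNat (cur ++ L)).2) := by
  intro L
  induction L with
  | nil =>
    intro cs cur hcur
    have hcond : ¬ (1 ≤ p.toNat ∧ p.toNat ≤ (cur ++ ([] : List (String × String))).length) := by
      simp; omega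
    rw [pvSplitFull, dif_neg hcond]
    simp
  | cons x L ih =>
    intro cs cur hcur
    simp only [List.foldl_cons]
    by_cases hfl : p ≤ (((cur ++ [x]).length : Nat) : Int)
    · have hstep : pvStep p (cs, cur) x = (cs ++ [cur ++ [x]], []) := by
        simp only [pvStep, if_pos hfl]
      rw [hstep, ih (cs ++ [cur ++ [x]]) [] (by simpa using hp)]
      have hlen : (cur ++ [x]).length = p.toNat := by simp at hfl ⊢; omega
      have h1 : List.take p.toNat ((cur ++ [x]) ++ L) = cur ++ [x] := by
        rw [← hlen]; exact List.take_left
      have h2 : List.drop p.toNat ((cur ++ [x]) ++ L) = L := by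
        rw [← hlen]; exact List.drop_left
      have hsf : pvSplitFull p.toNat (cur ++ x :: L)
          = ((cur ++ [x]) :: (pvSplitFull p.toNat L).1, (pvSplitFull p.toNat L).2) := by
        rw [show cur ++ x :: L = (cur ++ [x]) ++ L by simp]
        rw [pvSplitFull, dif_pos ⟨by omega, by simp [← hlen]⟩, h1, h2]
      rw [hsf]
      simp
    · have hstep : pvStep p (cs, cur) x = (cs, cur ++ [x]) := by
        simp only [pvStep, if_neg hfl]
      rw [hstep, ih cs (cur ++ [x]) (by simp at hfl ⊢; omega)]
      simp

-- closed form of pvSplitFull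
theorem pv_split_closed (p : Nat) (hp : 1 ≤ p) (L : List (String × String)) :
    pvSplitFull p L
      = ((List.range (L.length / p)).map (fun k => (L.drop (k * p)).take p),
         L.drop ((L.length / p) * p)) := by
  have main : ∀ (N : Nat) (L : List (String × String)), L.length ≤ N →
      pvSplitFull p L
        = ((List.range (L.length / p)).map (fun k => (L.drop (k * p)).take p),
           L.drop ((L.length / p) * p)) := by
    intro N
    induction N with
    | zero =>
      intro L hL
      have : L = [] := by cases L <;> simp_all
      subst this
      rw [pvSplitFull, dif_neg (by simp; omega)]
      simp
    | succ N ih =>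
      intro L hL
      by_cases hple : p ≤ L.length
      · rw [pvSplitFull, dif_pos ⟨hp, hple⟩]
        rw [ih (L.drop p) (by simp; omega)]
        have hq : L.length / p = (L.length - p) / p + 1 := Nat.div_eq_sub_div hp hple
        simp only [List.length_drop, List.drop_drop, Prod.mk.injEq]
        constructor
        · rw [hq, List.range_succ_eq_map]
          simp only [List.map_cons, List.map_map, Nat.zero_mul, List.drop_zero]
          congr 1
          apply List.map_congr_left
          intro k hk
          simp only [Function.comp_apply, Nat.succ_eq_add_one]
          congr 2
          ring
        · congr 1
          rw [hq]
          ring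
      · rw [pvSplitFull, dif_neg (by omega)]
        have : L.length / p = 0 := Nat.div_eq_of_lt (by omega)
        simp [this]
  exact main L.length L le_rfl

-- bridging List.range sums to Finset sums
theorem pv_list_sum_range (m : Nat) (f : Nat → Nat) :
    ((List.range m).map f).sum = ∑ i ∈ Finset.range m, f i := by
  induction m with
  | zero => simp
  | succ n ih => rw [List.range_succ, Finset.sum_range_succ, List.map_append, List.sum_append, ih]; simp

-- Gauss: the number of pairs (i, j) with i < j < m
theorem pv_gauss (m : Nat) : ((List.range m).map (fun k => m - (k+1))).sum = m*(m-1)/2 := by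
  rw [pv_list_sum_range]
  have h : (∑ i ∈ Finset.range m, (m - (i+1))) = ∑ i ∈ Finset.range m, (m - 1 - i) := by
    apply Finset.sum_congr rfl; intro i _; omega
  rw [h, Finset.sum_range_reflect (fun i => i) m, Finset.sum_range_id]

-- the number of pairs
theorem pv_pairs_len (as : List String) :
    (((PySem.List.pyRange 0 (as.length : Int) 1).flatMap (fun i =>
        (PySem.List.pyRange (i + 1) (as.length : Int) 1).map (fun j =>
          (PySem.List.pyGetD as i "", PySem.List.pyGetD as j "")))).length : Int)
      = PySem.Int.floordiv ((as.length : Int) * ((as.length : Int) - 1)) 2 := by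
  set m := as.length with hm
  rw [List.length_flatMap]
  simp only [List.length_map, PySem.List.length_pyRange_one]
  rw [PySem.List.pyRange_one]
  simp only [List.map_map]
  have hmn : ((m : Int) - 0).toNat = m := by omega
  rw [hmn]
  have hmap : (List.range m).map ((fun i => ((m:Int) - (i+1)).toNat) ∘ (fun k : Nat => (0:Int) + k))
      = (List.range m).map (fun k => m - (k+1)) := by
    apply List.map_congr_left
    intro k hk
    simp only [Function.comp_apply]
    omega
  rw [hmap, pv_gauss]
  have hcast : ((m : Int) * ((m : Int) - 1)) = ((m * (m-1) : Nat) : Int) := by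
    cases m with
    | zero => simp
    | succ t => push_cast [Nat.succ_sub_one]; ring
  rw [hcast]
  have := PySem.Int.floordiv_natCast (m*(m-1)) 2
  exact_mod_cast this.symm

-- A's final remainder-merge of the split equals the slice form (stated over Nat chunk size)
theorem pv_merge (p : Nat) (hp : 1 ≤ p) (L : List (String × String)) (hL : L ≠ [])
    (hple : p ≤ L.length) :
    (let st := pvSplitFull p L
     if st.2 ≠ [] then
       if st.1 ≠ [] then st.1.dropLast ++ [PySem.List.pyGetD st.1 (-1) [] ++ st.2]
       else st.1 ++ [st.2]
     else st.1)
      = (List.range (L.length / p - 1)).map (fun k => (L.drop (k * p)).take p)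
        ++ [L.drop ((L.length / p - 1) * p)] := by
  rw [pv_split_closed p hp L]
  set f := L.length / p with hfdef
  have hf : 1 ≤ f := (Nat.one_le_div_iff (by omega)).mpr hple
  have hfp : (f - 1) * p + p = f * p := by
    have h1 : p ≤ f * p := Nat.le_mul_of_pos_left p (by omega)
    have h2 : (f - 1) * p = f * p - p := Nat.sub_one_mul f p
    omega
  have hrange : List.range f = List.range (f - 1) ++ [f - 1] := by
    rw [show f = (f - 1) + 1 by omega, List.range_succ]
    simp
  have hfple : f * p ≤ L.length := Nat.div_mul_le_self L.length p
  simp only []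
  by_cases hr : L.drop (f * p) = []
  · rw [if_neg (by simpa using hr)]
    rw [hrange, List.map_append, List.map_singleton]
    congr 1
    have hlen : L.length ≤ f * p := by
      have h := congrArg List.length hr
      simp at h
      omega
    rw [List.take_of_length_le (by simp; omega)]
  · rw [if_pos (by simpa using hr)]
    have hne : (List.range f).map (fun k => (L.drop (k * p)).take p) ≠ [] := by
      simp; omega
    rw [if_pos (by simpa using hne)]
    rw [hrange, List.map_append, List.map_singleton, List.dropLast_concat,
      PySem.List.pyGetD_neg_one_append_singleton]
    have hdd : L.drop (f * p) = (L.drop ((f - 1) * p)).drop p := by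
      rw [List.drop_drop]
      congr 1
      omega
    rw [hdd, List.take_append_drop]

-- ===== VERDICT (by name: the statement is the Claim_ definition above) =====
theorem create_prompt_pairs_chunks_spec : Claim_equal_create_prompt_pairs_chunks := by
  intro as w _ hw
  unfold Spec_create_prompt_pairs_chunks create_prompt_pairs_chunks create_prompt_pairs_chunks_alt
  simp only [pv_fuse]
  rw [← pv_pairs_len as]
  set pairs := (PySem.List.pyRange 0 (as.length : Int) 1).flatMap (fun i =>
    (PySem.List.pyRange (i + 1) (as.length : Int) 1).map (fun j =>
      (PySem.List.pyGetD as i "", PySem.List.pyGetD as j ""))) with hpairs_def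
  set P : Int := max 1 (PySem.Int.floordiv (pairs.length : Int) w) with hP
  have hP1 : (1:Int) ≤ P := le_max_left _ _
  rw [pv_loop P hP1 pairs [] [] (by simp; omega)]
  by_cases hemp : pairs = []
  · rw [if_pos hemp, hemp]
    rw [pvSplitFull, dif_neg (by simp; omega)]
    simp
  · rw [if_neg hemp]
    have hlen1 : 1 ≤ pairs.length := List.length_pos_of_ne_nil hemp
    have hPle : P ≤ (pairs.length : Int) := by
      have hT0 : (1:Int) ≤ (pairs.length : Int) := by exact_mod_cast hlen1
      have hfd : PySem.Int.floordiv (pairs.length : Int) w ≤ (pairs.length : Int) := by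
        rcases lt_or_gt_of_ne hw with hneg | hpos
        · have hmb := PySem.Int.mod_neg_bounds (a := (pairs.length : Int)) (b := w) hneg
          have hdm := PySem.Int.floordiv_mul_add_mod (pairs.length : Int) w
          set q := PySem.Int.floordiv (pairs.length : Int) w with hq
          by_contra hcon
          rw [not_le] at hcon
          have hq1 : (1:Int) ≤ q := by omega
          have hqw : q * w ≤ 1 * w := mul_le_mul_of_nonpos_right hq1 (le_of_lt hneg)
          omega
        · rw [PySem.Int.floordiv_eq_ediv_of_pos hpos]
          exact Int.ediv_le_self _ (by omega)
      exact max_le hT0 hfd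
    set pt := P.toNat with hpt
    have hPpt : P = (pt : Int) := by omega
    have hpt1 : 1 ≤ pt := by omega
    have hptle : pt ≤ pairs.length := by omega
    have hA := pv_merge pt hpt1 pairs hemp hptle
    simp only [List.nil_append] at hA ⊢
    rw [hA]
    -- B side
    have hF : PySem.Int.floordiv (pairs.length : Int) P = ((pairs.length / pt : Nat) : Int) := by
      rw [hPpt]
      exact_mod_cast PySem.Int.floordiv_natCast pairs.length pt
    rw [hF]
    set fN := pairs.length / pt with hfN
    have hfN1 : 1 ≤ fN := (Nat.one_le_div_iff (by omega)).mpr hptle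
    have e0 : ((fN : Int) - 1) = ((fN - 1 : Nat) : Int) := by omega
    rw [e0, PySem.List.pyRange_one]
    simp only [List.map_map]
    have et : ((((fN - 1 : Nat) : Int)) - 0).toNat = fN - 1 := by omega
    rw [et]
    have hmapB : (List.range (fN-1)).map
        ((fun k : Int => PySem.List.slice pairs (some (k*P)) (some ((k+1)*P))) ∘ (fun k : Nat => (0:Int)+k))
        = (List.range (fN-1)).map (fun k => (pairs.drop (k*pt)).take pt) := by
      apply List.map_congr_left
      intro k hk
      simp only [Function.comp_apply]
      have e1 : ((0:Int)+(k:Int))*P = ((k*pt : Nat) : Int) := by rw [hPpt]; push_cast; ring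
      have e2 : ((0:Int)+(k:Int)+1)*P = ((k*pt : Nat) : Int) + ((pt : Nat) : Int) := by
        rw [hPpt]; push_cast; ring
      rw [e1, e2]
      exact_mod_cast PySem.List.slice_natCast_add pairs (k*pt) pt
    rw [hmapB]
    have e3 : (((fN-1 : Nat) : Int)) * P = (((fN-1)*pt : Nat) : Int) := by
      rw [hPpt]; push_cast; ring
    rw [e3, PySem.List.slice_from_natCast]
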